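-- pv_equiv track=rewrite | github.com/ilambrev/Codewars | Python_Solutions/014ReverseReverse.py | esrever
-- ===== SOURCE A (Python) =====
-- def esrever(st):
--     if st:
--         sign = st[len(st) - 1]
--         st = st[:-1]
--         words = st.split()
--         words.reverse()
--
--         for i in range(0, len(words)):
--             words[i] = words[i][::-1]
--
--         return ' '.join(words) + sign
--     else:
--         return st
-- ===== SOURCE B (Python) =====
-- def esrever(st):
--     if st:
--         out = []           # normalized sentence chars, built in one pass
--         in_word = False
--         for ch in st[:-1]:
--             if ch.isspace():
--                 in_word = False
--             else:
--                 if not in_word and out: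
--                     out.append(' ')
--                 out.append(ch)
--                 in_word = True
--         out.reverse()
--         return ''.join(out) + st[-1]
--     else:
--         return st
-- ===== Notes on version B (the rewrite author's own statement) =====
-- stated objective: alternative
-- what changed: Instead of splitting into a word list, reversing the list and reversing each word in an index loop before joining, B runs a single character-level state machine that normalizes whitespace in one pass and then reverses the whole character list once.
import Mathlib
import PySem

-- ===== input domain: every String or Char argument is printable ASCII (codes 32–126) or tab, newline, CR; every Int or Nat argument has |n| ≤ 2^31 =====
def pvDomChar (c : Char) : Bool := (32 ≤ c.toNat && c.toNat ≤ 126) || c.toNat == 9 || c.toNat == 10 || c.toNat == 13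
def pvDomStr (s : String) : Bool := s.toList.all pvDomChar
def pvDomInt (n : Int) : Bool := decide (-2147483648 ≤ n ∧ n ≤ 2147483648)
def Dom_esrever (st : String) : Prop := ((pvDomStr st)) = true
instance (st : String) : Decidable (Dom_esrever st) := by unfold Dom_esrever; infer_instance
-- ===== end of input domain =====

-- B replaces A's split/reverse-list/reverse-each-word/join pipeline with a single
-- character-level state machine that normalizes whitespace in one pass and then
-- reverses the character list once (objective: alternative).

-- ===== PORT A =====
def esrever (st : String) : String :=
  if st.toList.isEmpty then st          -- 'if st:' (else branch returns st)
  else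
    let cs := st.toList
    let sign := PySem.List.pyGetD cs (PySem.List.len cs - 1) ' '   -- st[len(st) - 1]
    let cs' := PySem.List.slice cs none (some (-1))                 -- st[:-1]
    let words := (PySem.Chars.split₀ cs').reverse                   -- st.split(); words.reverse()
    -- for i in range(len(words)): words[i] = words[i][::-1]
    let words := words.map (fun w => (PySem.List.slice? w none none (-1)).getD [])
    String.ofList (PySem.Chars.join [' '] words ++ [sign])          -- ' '.join(words) + sign

-- ===== PORT B =====
-- one iteration of B's loop; state = (out, in_word)
def esreverStep (s : List Char × Bool) (ch : Char) : List Char × Bool :=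
  if PySem.Chars.isspace ch then (s.1, false)
  else
    let out := if !s.2 && !s.1.isEmpty then s.1 ++ [' '] else s.1   -- separating space
    (out ++ [ch], true)

def esrever_alt (st : String) : String :=
  if st.toList.isEmpty then st
  else
    let p := (PySem.List.slice st.toList none (some (-1))).foldl esreverStep ([], false)  -- for ch in st[:-1]
    String.ofList (p.1.reverse ++ [PySem.List.pyGetD st.toList (-1) ' '])  -- out.reverse(); ''.join(out) + st[-1]

-- ===== PRECONDITION & SPEC =====
def Spec_esrever (st : String) (out : String) : Prop := out = esrever_alt st
instance (st : String) (out : String) : Decidable (Spec_esrever st out) := by unfold Spec_esrever; infer_instance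

-- ===== CLAIM =====
def Claim_equal_esrever : Prop := ∀ (st : String), Dom_esrever st → Spec_esrever st (esrever st)

-- ===== LEMMAS AND PROOFS =====

-- ' '.join(xs ++ [w]) for nonempty xs appends 'sep ++ w' at the end
theorem join_append_singleton (sep w : List Char) (xs : List (List Char)) (h : xs ≠ []) :
    PySem.Chars.join sep (xs ++ [w]) = PySem.Chars.join sep xs ++ sep ++ w := by
  induction xs with
  | nil => exact absurd rfl h
  | cons x rest ih =>
    cases rest with
    | nil => simp [PySem.Chars.join, List.intercalate]
    | cons y t =>
      have h1 : (x :: y :: t) ++ [w] = x :: y :: (t ++ [w]) := by simp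
      rw [h1, PySem.Chars.join_cons_cons sep x y (t ++ [w]), ← List.cons_append, ih (by simp),
        PySem.Chars.join_cons_cons sep x y t]
      simp [List.append_assoc]

-- reversing word order and each word = reversing the space-joined string
theorem join_rev (ws : List (List Char)) :
    PySem.Chars.join [' '] (ws.reverse.map List.reverse)
      = (PySem.Chars.join [' '] ws).reverse := by
  induction ws with
  | nil => simp [PySem.Chars.join, List.intercalate]
  | cons p rest ih =>
    cases rest with
    | nil => simp [PySem.Chars.join, List.intercalate]
    | cons y t =>
      rw [PySem.Chars.join_cons_cons]
      have hne : ((y :: t).reverse.map List.reverse) ≠ [] := by simp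
      rw [List.reverse_cons, List.map_append, List.map_cons, List.map_nil,
        join_append_singleton _ _ _ hne, ih]
      simp

-- appending a character to the last of the joined words
theorem join_snoc_char (xs : List (List Char)) (w : List Char) (c : Char) :
    PySem.Chars.join [' '] (xs ++ [w]) ++ [c]
      = PySem.Chars.join [' '] (xs ++ [w ++ [c]]) := by
  cases xs with
  | nil => simp [PySem.Chars.join_singleton]
  | cons x t =>
    rw [join_append_singleton _ _ _ (by simp), join_append_singleton _ _ _ (by simp)]
    simp

-- joining the reverse of a nonempty list of nonempty words is nonempty
theorem join_rev_ne_nil (acc : List (List Char)) (hne : acc ≠ [])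
    (hacc : ∀ w ∈ acc, w ≠ []) :
    PySem.Chars.join [' '] acc.reverse ≠ [] := by
  cases acc with
  | nil => exact absurd rfl hne
  | cons a t =>
    rw [List.reverse_cons]
    cases ht : t.reverse with
    | nil =>
      have ha : a ≠ [] := hacc a (by simp)
      simpa [PySem.Chars.join_singleton, ht] using ha
    | cons x u =>
      rw [← ht, join_append_singleton _ _ _ (by simp [ht])]
      simp

-- B's normalized prefix, expressed through go's state
def esreverJ (cur : List Char) (acc : List (List Char)) : List Char :=
  PySem.Chars.join [' '] (acc.reverse ++ if cur.isEmpty then [] else [cur.reverse])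

-- loop invariant: B's one-pass machine computes the ' '-join of split₀.go
theorem loop_eq (s : List Char) : ∀ (cur : List Char) (acc : List (List Char)),
    (∀ w ∈ acc, w ≠ []) →
    (s.foldl esreverStep (esreverJ cur acc, !cur.isEmpty)).1
      = PySem.Chars.join [' '] (PySem.Chars.split₀.go s cur acc) := by
  induction s with
  | nil =>
    intro cur acc _
    simp only [List.foldl_nil, PySem.Chars.split₀.go, esreverJ]
    by_cases hc : cur.isEmpty <;> simp [hc]
  | cons c rest ih =>
    intro cur acc hacc
    rw [List.foldl_cons]
    by_cases hs : PySem.Chars.isspace c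
    · -- whitespace: in_word := False; go flushes cur if nonempty
      have hstep : esreverStep (esreverJ cur acc, !cur.isEmpty) c
          = (esreverJ cur acc, false) := by
        simp [esreverStep, hs]
      rw [hstep]
      simp only [PySem.Chars.split₀.go, hs, if_true]
      by_cases hc : cur.isEmpty
      · have hc' : cur = [] := List.isEmpty_iff.mp hc
        subst hc'
        simpa using ih [] acc hacc
      · have hcf : cur.isEmpty = false := by revert hc; cases cur.isEmpty <;> simp
        have hcur : cur ≠ [] := by simpa [List.isEmpty_iff] using hc
        have hacc' : ∀ w ∈ cur.reverse :: acc, w ≠ [] := by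
          intro w hw
          rcases List.mem_cons.mp hw with h | h
          · subst h; simpa using hcur
          · exact hacc w h
        have hJ : esreverJ cur acc = esreverJ [] (cur.reverse :: acc) := by
          simp [esreverJ, hcf]
        rw [hcf, if_neg (by simp), hJ]
        simpa using ih [] (cur.reverse :: acc) hacc'
    · -- non-whitespace: append c (with separating space when starting a new word)
      simp only [PySem.Chars.split₀.go, hs]
      by_cases hc : cur.isEmpty
      · have hc' : cur = [] := List.isEmpty_iff.mp hc
        subst hc'
        by_cases ha : acc = []
        · subst ha
          have hstep : esreverStep (esreverJ [] [], !([] : List Char).isEmpty) c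
              = (esreverJ [c] [], !([c] : List Char).isEmpty) := by
            simp [esreverStep, hs, esreverJ, PySem.Chars.join_nil, PySem.Chars.join_singleton]
          rw [hstep]
          exact ih [c] [] (by simp)
        · have hne := join_rev_ne_nil acc ha hacc
          have hJ0 : esreverJ [] acc = PySem.Chars.join [' '] acc.reverse := by
            simp [esreverJ]
          have hJc : esreverJ [] acc ++ [' '] ++ [c] = esreverJ [c] acc := by
            rw [hJ0]
            simp only [esreverJ, List.isEmpty_cons, Bool.false_eq_true, if_false,
              List.reverse_singleton]
            rw [join_append_singleton _ _ _ (by simpa using ha)]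
          have hstep : esreverStep (esreverJ [] [] ++ esreverJ [] acc, !([] : List Char).isEmpty) c
              = (esreverJ [c] acc, !([c] : List Char).isEmpty) := by
            simp only [esreverStep, hs]
            have h1 : esreverJ [] [] ++ esreverJ [] acc = esreverJ [] acc := by
              simp [esreverJ, PySem.Chars.join_nil]
            have h2 : (esreverJ [] acc).isEmpty = false := by
              rw [hJ0]; simpa [List.isEmpty_iff] using hne
            simp only [h1, List.isEmpty_nil, Bool.not_true, Bool.not_false,
              Bool.true_and, h2, ← hJc]
            simp
          have h1 : esreverJ [] [] ++ esreverJ [] acc = esreverJ [] acc := by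
            simp [esreverJ, PySem.Chars.join_nil]
          rw [← h1, hstep]
          exact ih [c] acc hacc
      · have hcf : cur.isEmpty = false := by revert hc; cases cur.isEmpty <;> simp
        have hsnoc : esreverJ cur acc ++ [c] = esreverJ (c :: cur) acc := by
          simp only [esreverJ, hcf, Bool.false_eq_true, if_false, List.isEmpty_cons,
            List.reverse_cons]
          rw [join_snoc_char]
        have hstep : esreverStep (esreverJ cur acc, !cur.isEmpty) c
            = (esreverJ (c :: cur) acc, !((c :: cur) : List Char).isEmpty) := by
          simp [esreverStep, hs, hcf, hsnoc]
        rw [hstep]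
        exact ih (c :: cur) acc hacc

theorem esrever_spec : Claim_equal_esrever := by
  unfold Claim_equal_esrever Spec_esrever esrever esrever_alt
  intro st _
  by_cases h : st.toList.isEmpty
  · simp [h]
  · have hne : st.toList ≠ [] := by simpa [List.isEmpty_iff] using h
    have hl : 0 < st.toList.length := List.length_pos_of_ne_nil hne
    have hidx : PySem.List.len st.toList - 1 = ((st.toList.length - 1 : Nat) : Int) := by
      rw [PySem.List.len_eq]; omega
    have hsign : PySem.List.pyGetD st.toList (PySem.List.len st.toList - 1) ' '
        = PySem.List.pyGetD st.toList (-1) ' ' := by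
      rw [hidx, PySem.List.pyGetD_natCast, PySem.List.pyGetD_neg_one _ _ hne,
        List.getLast_eq_getElem, List.getD_eq_getElem _ _ (by omega)]
    have hloop := loop_eq (PySem.List.slice st.toList none (some (-1))) [] [] (by simp)
    have hJ : esreverJ [] ([] : List (List Char)) = [] := by
      simp [esreverJ, PySem.Chars.join_nil]
    rw [hJ] at hloop
    simp only [h, hsign, PySem.List.slice?_none_none_neg_one, Option.getD_some,
      PySem.Chars.split₀, join_rev]
    rw [← hloop]
    simp
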